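-- pv_equiv track=rewrite | github.com/superoverflow/leetcode_prep | src/max_profit.py | calc_max_profit
-- ===== SOURCE A (Python) =====
-- def calc_max_profit(stock_price: list[int]) -> list[list[int]]:
--     # max_profit[i][j] = max profit holding from i to j
--     max_profit = [[0 for _ in range(len(stock_price))] for _ in range(len(stock_price))]
--
--     # notice, max_profit[i][j] = max(max_profit[i][j-1], stock_price[j] - stock_price[i])
--     for i in range(len(stock_price)):
--         for j in range(i + 1, len(stock_price)):
--             max_profit[i][j] = max(
--                 max_profit[i][j - 1], stock_price[j] - stock_price[i]
--             )
--
--     return max_profit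
-- ===== SOURCE B (Python) =====
-- def calc_max_profit(stock_price: list[int]) -> list[list[int]]:
--     # Rows are built bottom-up: row i's profits are derived from row i+1's
--     # profits by the recurrence profit_i[j] = max(0, profit_{i+1}[j] + (p[i+1] - p[i])),
--     # since max(p[i..j]) - p[i] = max(p[i], max(p[i+1..j])) - p[i].
--     n = len(stock_price)
--     rows = []
--     tail = []  # profit cells of the row below, for columns > its diagonal
--     for i in range(n - 1, -1, -1):
--         if i + 1 < n:
--             d = stock_price[i + 1] - stock_price[i]
--             tail = [x + d if x + d > 0 else 0 for x in [0] + tail]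
--         rows.append([0] * (i + 1) + tail)
--     rows.reverse()
--     return rows
-- ===== Notes on version B (the rewrite author's own statement) =====
-- stated objective: alternative
-- what changed: B builds the matrix bottom-up: it iterates rows in reverse and derives each row's profit cells from the row below via a single list comprehension profit_i[j] = max(0, profit_{i+1}[j] + (price[i+1] - price[i])), instead of A's left-to-right per-row DP that reads the previously written cell max_profit[i][j-1] and stock_price[j] by index for every cell.
import Mathlib
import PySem

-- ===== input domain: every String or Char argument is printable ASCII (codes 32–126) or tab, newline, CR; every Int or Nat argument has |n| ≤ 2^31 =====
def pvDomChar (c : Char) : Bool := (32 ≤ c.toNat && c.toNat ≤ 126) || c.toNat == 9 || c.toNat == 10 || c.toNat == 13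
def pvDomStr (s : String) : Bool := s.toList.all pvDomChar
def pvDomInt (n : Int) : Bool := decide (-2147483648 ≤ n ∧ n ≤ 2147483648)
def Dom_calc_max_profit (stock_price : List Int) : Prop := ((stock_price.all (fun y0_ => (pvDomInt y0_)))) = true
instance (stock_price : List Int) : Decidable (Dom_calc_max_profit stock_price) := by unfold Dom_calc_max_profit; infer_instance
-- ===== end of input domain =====

-- B builds the matrix bottom-up, deriving each row from the row below via
-- profit_i[j] = max(0, profit_{i+1}[j] + (price[i+1] - price[i])), instead of A's
-- left-to-right per-row DP; the return values are proved equal on all inputs.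

-- ===== PORT A =====
-- Literal port of A: full n×n zero matrix, then for i in range(n), for j in range(i+1, n):
-- max_profit[i][j] = max(max_profit[i][j-1], stock_price[j] - stock_price[i]).
-- All indices here are nonnegative and in range, so the total forms pyGetD/pySetD are exact.
def calc_max_profit (stock_price : List Int) : List (List Int) :=
  let n : Int := (stock_price.length : Int)
  let max_profit : List (List Int) :=
    (PySem.List.pyRange 0 n 1).map (fun _ => (PySem.List.pyRange 0 n 1).map (fun _ => (0 : Int)))
  (PySem.List.pyRange 0 n 1).foldl (fun m i =>
    (PySem.List.pyRange (i + 1) n 1).foldl (fun m j =>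
      PySem.List.pySetD m i
        (PySem.List.pySetD (PySem.List.pyGetD m i []) j
          (max (PySem.List.pyGetD (PySem.List.pyGetD m i []) (j - 1) 0)
               (PySem.List.pyGetD stock_price j 0 - PySem.List.pyGetD stock_price i 0)))) m)
    max_profit

-- ===== PORT B =====
-- Literal port of B: rows = []; tail = []; for i in range(n-1, -1, -1):
--   if i+1 < n: d = sp[i+1]-sp[i]; tail = [x+d if x+d>0 else 0 for x in [0]+tail]
--   rows.append([0]*(i+1) + tail); rows.reverse(); return rows.
-- State of the fold is (tail, rows); indices used are in range, so pyGetD is exact.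
def calc_max_profit_alt (stock_price : List Int) : List (List Int) :=
  let n : Int := (stock_price.length : Int)
  let st := (PySem.List.pyRange (n - 1) (-1) (-1)).foldl
    (fun (st : List Int × List (List Int)) i =>
      let tail :=
        if i + 1 < n then
          ((0 : Int) :: st.1).map (fun x =>
            let d := PySem.List.pyGetD stock_price (i + 1) 0 - PySem.List.pyGetD stock_price i 0
            if x + d > 0 then x + d else 0)
        else st.1
      (tail, st.2 ++ [PySem.List.pyRepeat [(0 : Int)] (i + 1) ++ tail]))
    ([], [])
  st.2.reverse

-- ===== PRECONDITION & SPEC =====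
def Spec_calc_max_profit (stock_price : List Int) (out : List (List Int)) : Prop := out = calc_max_profit_alt stock_price
instance (stock_price : List Int) (out : List (List Int)) : Decidable (Spec_calc_max_profit stock_price out) := by unfold Spec_calc_max_profit; infer_instance

-- ===== CLAIM (what is proved, stated in full; the proofs are below) =====
def Claim_equal_calc_max_profit : Prop := ∀ (stock_price : List Int), Dom_calc_max_profit stock_price → Spec_calc_max_profit stock_price (calc_max_profit stock_price)

-- ===== LEMMAS AND PROOFS =====

-- Row profits as a scan: running maximum b of the prices seen so far, minus the buy price p.
def scanB (p : Int) : Int → List Int → List Int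
  | _, [] => []
  | b, q :: qs => (max b q - p) :: scanB p (max b q) qs

-- The common closed form of row k.
def rowSpec (sp : List Int) (k : Nat) : List Int :=
  List.replicate (k + 1) 0 ++ scanB (sp.getD k 0) (sp.getD k 0) (sp.drop (k + 1))

-- The profit cells of row k, past its diagonal.
def tailSpec (sp : List Int) (k : Nat) : List Int :=
  scanB (sp.getD k 0) (sp.getD k 0) (sp.drop (k + 1))

-- Shifting a scan's buy price by c - p: scanB p (max p c') qs is the pointwise
-- clamped shift of scanB c c' qs.
theorem scanB_shift : ∀ (qs : List Int) (p c c' : Int),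
    scanB p (max p c') qs
      = (scanB c c' qs).map (fun x => if x + (c - p) > 0 then x + (c - p) else 0) := by
  intro qs
  induction qs with
  | nil => intro p c c'; simp [scanB]
  | cons q qs ih =>
    intro p c c'
    simp only [scanB, List.map_cons]
    congr 1
    · split_ifs with h <;> omega
    · rw [max_assoc]; exact ih p c (max c' q)

-- One backward step: row k's tail is the clamped shift of (0 :: row (k+1)'s tail).
theorem tailSpec_step (sp : List Int) (k : Nat) (hk : k + 1 < sp.length) :
    tailSpec sp k
      = ((0 : Int) :: tailSpec sp (k + 1)).map (fun x =>
          if x + (sp.getD (k + 1) 0 - sp.getD k 0) > 0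
          then x + (sp.getD (k + 1) 0 - sp.getD k 0) else 0) := by
  have hdrop : sp.drop (k + 1) = sp.getD (k + 1) 0 :: sp.drop (k + 2) := by
    rw [List.getD_eq_getElem?_getD, List.getElem?_eq_getElem hk]
    exact List.drop_eq_getElem_cons hk
  set p := sp.getD k 0 with hp
  set q := sp.getD (k + 1) 0 with hq
  rw [tailSpec, tailSpec, hdrop]
  simp only [scanB, List.map_cons]
  congr 1
  · split_ifs with h <;> omega
  · have h2 : (k + 1) + 1 = k + 2 := rfl
    rw [h2]
    have := scanB_shift (sp.drop (k + 2)) p q q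
    simpa using this

-- The countdown list [k-1, k-2, …, 0] as Ints.
def cntL (k : Nat) : List Int := (List.range k).map (fun (j : Nat) => (k : Int) - 1 - (j : Int))

theorem cntL_succ (k : Nat) : cntL (k + 1) = (k : Int) :: cntL k := by
  unfold cntL
  rw [List.range_succ_eq_map, List.map_cons, List.map_map]
  congr 1
  · push_cast; ring
  · apply List.map_congr_left
    intro j _
    simp only [Function.comp]
    push_cast; ring

-- B's fold step.
def bStep (sp : List Int) (st : List Int × List (List Int)) (i : Int) :
    List Int × List (List Int) :=
  let tail :=
    if i + 1 < (sp.length : Int) then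
      ((0 : Int) :: st.1).map (fun x =>
        let d := PySem.List.pyGetD sp (i + 1) 0 - PySem.List.pyGetD sp i 0
        if x + d > 0 then x + d else 0)
    else st.1
  (tail, st.2 ++ [PySem.List.pyRepeat [(0 : Int)] (i + 1) ++ tail])

-- Invariant of B's backward fold: starting from row k's state, folding the
-- countdown [k-1,…,0] appends rows k-1,…,0 and ends on row 0's tail.
theorem b_inv (sp : List Int) : ∀ (k : Nat), k ≤ sp.length → ∀ (R : List (List Int)),
    (cntL k).foldl (bStep sp) (tailSpec sp k, R)
      = (tailSpec sp 0, R ++ ((List.range k).map (rowSpec sp)).reverse) := by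
  intro k
  induction k with
  | zero => intro _ R; simp [cntL]
  | succ k ih =>
    intro hk R
    rw [cntL_succ, List.foldl_cons]
    have htail : (bStep sp (tailSpec sp (k + 1), R) ((k : Nat) : Int)).1 = tailSpec sp k := by
      by_cases h : k + 1 < sp.length
      · rw [bStep]
        simp only
        rw [if_pos (by exact_mod_cast h)]
        rw [tailSpec_step sp k h]
        congr 1
        funext x
        have e1 : ((k : Int) + 1) = (((k + 1 : Nat)) : Int) := by push_cast; ring
        rw [e1, PySem.List.pyGetD_natCast, PySem.List.pyGetD_natCast]
      · have hkn : k + 1 = sp.length := by omega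
        rw [bStep]
        simp only
        rw [if_neg (by exact_mod_cast (by omega : ¬ ((k : Int) + 1 < (sp.length : Int))))]
        rw [tailSpec, tailSpec]
        rw [List.drop_eq_nil_of_le (by omega), List.drop_eq_nil_of_le (by omega)]
        simp [scanB]
    have hrow : PySem.List.pyRepeat [(0 : Int)] ((k : Int) + 1) ++ tailSpec sp k
        = rowSpec sp k := by
      have ht : (((k : Int) + 1)).toNat = k + 1 := by omega
      rw [PySem.List.pyRepeat_singleton, ht, rowSpec, tailSpec]
    have hstep : bStep sp (tailSpec sp (k + 1), R) ((k : Nat) : Int)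
        = (tailSpec sp k, R ++ [rowSpec sp k]) := by
      rw [bStep] at htail ⊢
      simp only at htail ⊢
      rw [htail, hrow]
    rw [hstep, ih (by omega) (R ++ [rowSpec sp k])]
    rw [List.range_succ, List.map_append, List.reverse_append]
    simp [List.append_assoc]

-- B equals the closed form.
theorem b_eq (sp : List Int) :
    calc_max_profit_alt sp = (List.range sp.length).map (rowSpec sp) := by
  have hB : calc_max_profit_alt sp
      = ((PySem.List.pyRange ((sp.length : Int) - 1) (-1) (-1)).foldl (bStep sp) ([], [])).2.reverse := rfl
  have hrng : PySem.List.pyRange ((sp.length : Int) - 1) (-1) (-1) = cntL sp.length := by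
    rw [PySem.List.pyRange_neg_one, cntL]
    have h : ((sp.length : Int) - 1 - (-1)).toNat = sp.length := by omega
    rw [h]
  have hinit : tailSpec sp sp.length = ([] : List Int) := by
    rw [tailSpec, List.drop_eq_nil_of_le (by omega)]
    rfl
  have hfold : (cntL sp.length).foldl (bStep sp) (([] : List Int), ([] : List (List Int)))
      = (tailSpec sp 0, [] ++ ((List.range sp.length).map (rowSpec sp)).reverse) := by
    rw [← hinit]
    exact b_inv sp sp.length (le_refl _) []
  rw [hB, hrng, hfold]
  simp

-- A's inner matrix fold only touches row i, so it factors through a fold on that row.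
theorem fold_set_row (i : Nat) (f : List Int → Int → List Int) :
    ∀ (js : List Int) (m : List (List Int)), i < m.length →
    js.foldl (fun m j => PySem.List.pySetD m (i : Int) (f (PySem.List.pyGetD m (i : Int) []) j)) m
      = PySem.List.pySetD m (i : Int) (js.foldl f (PySem.List.pyGetD m (i : Int) [])) := by
  intro js
  induction js with
  | nil =>
    intro m hm
    simp only [List.foldl_nil, PySem.List.pySetD_natCast, PySem.List.pyGetD_natCast]
    rw [List.getD_eq_getElem?_getD, List.getElem?_eq_getElem hm]
    simp [List.set_getElem_self]
  | cons j js ih =>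
    intro m hm
    simp only [List.foldl_cons]
    rw [ih _ (by simp [PySem.List.pySetD_natCast]; omega)]
    simp only [PySem.List.pySetD_natCast, PySem.List.pyGetD_natCast]
    simp only [List.getD_eq_getElem?_getD]
    rw [List.getElem?_set_self (by omega), List.set_set]
    simp

-- A's row fold, with the running invariant: the last written cell holds b - p,
-- where b is the running maximum of the prices up to that column.
theorem a_row (sp : List Int) (p : Int) : ∀ (qs pre : List Int) (b : Int),
    0 < pre.length →
    sp.drop pre.length = qs →
    pre.getD (pre.length - 1) 0 = b - p →
    (List.range qs.length).foldl
      (fun (r : List Int) (t : Nat) =>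
        PySem.List.pySetD r ((pre.length : Int) + (t : Int))
          (max (PySem.List.pyGetD r (((pre.length : Int) + (t : Int)) - 1) 0)
               (PySem.List.pyGetD sp ((pre.length : Int) + (t : Int)) 0 - p)))
      (pre ++ List.replicate qs.length 0)
    = pre ++ scanB p b qs := by
  intro qs
  induction qs with
  | nil => intro pre b h1 h2 h3; simp [scanB]
  | cons q qs ih =>
    intro pre b h1 h2 h3
    have hq : sp.getD pre.length 0 = q := by
      have h0 : (sp.drop pre.length)[0]? = some q := by rw [h2]; rfl
      rw [List.getElem?_drop] at h0
      simp only [Nat.add_zero] at h0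
      rw [List.getD_eq_getElem?_getD, h0]; rfl
    rw [List.length_cons, List.range_succ_eq_map, List.foldl_cons, List.foldl_map]
    have hstep : PySem.List.pySetD (pre ++ List.replicate (qs.length + 1) 0) ((pre.length : Int) + ((0:Nat) : Int))
          (max (PySem.List.pyGetD (pre ++ List.replicate (qs.length + 1) 0) (((pre.length : Int) + ((0:Nat) : Int)) - 1) 0)
               (PySem.List.pyGetD sp ((pre.length : Int) + ((0:Nat) : Int)) 0 - p))
        = (pre ++ [max b q - p]) ++ List.replicate qs.length 0 := by
      have e1 : ((pre.length : Int) + ((0:Nat):Int)) = ((pre.length : Nat) : Int) := by push_cast; ring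
      have e2 : ((pre.length : Int) + ((0:Nat):Int)) - 1 = (((pre.length - 1 : Nat)) : Int) := by
        push_cast [h1]; omega
      rw [e2, e1, PySem.List.pySetD_natCast, PySem.List.pyGetD_natCast, PySem.List.pyGetD_natCast]
      rw [List.getD_append _ _ _ _ (by omega), h3, hq]
      rw [List.replicate_succ, List.set_append_right _ _ (by omega)]
      simp only [Nat.sub_self, List.set_cons_zero]
      rw [show max (b - p) (q - p) = max b q - p by omega]
      simp [List.append_assoc]
    rw [hstep]
    have hfun : (fun (r : List Int) (t : Nat) =>
        PySem.List.pySetD r ((pre.length : Int) + ((t.succ : Nat) : Int))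
          (max (PySem.List.pyGetD r (((pre.length : Int) + ((t.succ : Nat) : Int)) - 1) 0)
               (PySem.List.pyGetD sp ((pre.length : Int) + ((t.succ : Nat) : Int)) 0 - p)))
        = (fun (r : List Int) (t : Nat) =>
        PySem.List.pySetD r (((pre ++ [max b q - p]).length : Int) + (t : Int))
          (max (PySem.List.pyGetD r ((((pre ++ [max b q - p]).length : Int) + (t : Int)) - 1) 0)
               (PySem.List.pyGetD sp (((pre ++ [max b q - p]).length : Int) + (t : Int)) 0 - p))) := by
      funext r t
      have e : ((pre.length : Int) + ((t.succ : Nat) : Int)) = (((pre ++ [max b q - p]).length : Int) + (t : Int)) := by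
        simp
        ring
      rw [e]
    rw [hfun, ih (pre ++ [max b q - p]) (max b q) (by simp) ?_ ?_]
    · simp [scanB, List.append_assoc]
    · simp only [List.length_append, List.length_cons, List.length_nil]
      rw [← List.drop_drop, h2]; rfl
    · simp

-- Generic fold of a step function along range' against an indexed invariant.
theorem fold_range' {α : Type} (n : Nat) (M : Nat → α) (G : α → Nat → α)
    (hstep : ∀ s, s < n → G (M s) s = M (s + 1)) :
    ∀ (t s : Nat), s + t = n → (List.range' s t).foldl G (M s) = M n := by
  intro t
  induction t with
  | zero =>
    intro s hs
    simp only [List.range'_zero, List.foldl_nil]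
    have : s = n := by omega
    rw [this]
  | succ t ih =>
    intro s hs
    rw [List.range'_succ, List.foldl_cons, hstep s (by omega), ih (s + 1) (by omega)]

-- A equals the closed form.
theorem a_eq (sp : List Int) :
    calc_max_profit sp = (List.range sp.length).map (rowSpec sp) := by
  unfold calc_max_profit
  set n := sp.length with hn
  set M : Nat → List (List Int) := fun s =>
    (List.range n).map (fun k => if k < s then rowSpec sp k else List.replicate n 0) with hM
  have hMlen : ∀ s, (M s).length = n := by intro s; simp [hM]
  have hMget : ∀ s k (hk : k < n), (M s)[k]'(by rw [hMlen]; exact hk)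
      = if k < s then rowSpec sp k else List.replicate n 0 := by
    intro s k hk; simp [hM]
  -- zeros matrix is M 0
  have hm0 : ((PySem.List.pyRange 0 (n : Int) 1).map
      (fun _ => (PySem.List.pyRange 0 (n : Int) 1).map (fun _ => (0 : Int)))) = M 0 := by
    rw [PySem.List.pyRange_one]
    simp [hM, List.map_map, Function.comp_def, List.map_const']
  -- step of the outer loop
  have hstep : ∀ s, s < n →
      (PySem.List.pyRange ((s : Int) + 1) (n : Int) 1).foldl (fun m j =>
        PySem.List.pySetD m ((s : Int))
          (PySem.List.pySetD (PySem.List.pyGetD m ((s : Int)) []) j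
            (max (PySem.List.pyGetD (PySem.List.pyGetD m ((s : Int)) []) (j - 1) 0)
                 (PySem.List.pyGetD sp j 0 - PySem.List.pyGetD sp ((s : Int)) 0)))) (M s)
      = M (s + 1) := by
    intro s hs
    rw [fold_set_row s (fun r j =>
        PySem.List.pySetD r j
          (max (PySem.List.pyGetD r (j - 1) 0)
               (PySem.List.pyGetD sp j 0 - PySem.List.pyGetD sp ((s : Int)) 0))) _ _ (by rw [hMlen]; exact hs)]
    have hget : PySem.List.pyGetD (M s) ((s : Int)) [] = List.replicate n 0 := by
      rw [PySem.List.pyGetD_natCast, List.getD_eq_getElem?_getD,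
          List.getElem?_eq_getElem (by rw [hMlen]; exact hs), hMget s s hs]
      simp
    rw [hget]
    set qs : List Int := sp.drop (s + 1) with hqs
    have hlen : ((n : Int) - ((s : Int) + 1)).toNat = qs.length := by
      rw [hqs, List.length_drop]; omega
    rw [PySem.List.pyRange_one ((s : Int) + 1) (n : Int), hlen, List.foldl_map]
    set pre : List Int := List.replicate (s + 1) 0 with hpre
    set p : Int := sp.getD s 0 with hp
    have hsp : PySem.List.pyGetD sp ((s : Int)) 0 = p := by
      rw [PySem.List.pyGetD_natCast]
    have hrep : List.replicate n (0 : Int) = pre ++ List.replicate qs.length 0 := by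
      rw [hpre, ← List.replicate_add]
      congr 1
      rw [hqs, List.length_drop]; omega
    have hfun : (fun (r : List Int) (t : Nat) =>
        PySem.List.pySetD r (((s : Int) + 1) + (t : Int))
          (max (PySem.List.pyGetD r ((((s : Int) + 1) + (t : Int)) - 1) 0)
               (PySem.List.pyGetD sp (((s : Int) + 1) + (t : Int)) 0 - PySem.List.pyGetD sp ((s : Int)) 0)))
        = (fun (r : List Int) (t : Nat) =>
        PySem.List.pySetD r ((pre.length : Int) + (t : Int))
          (max (PySem.List.pyGetD r (((pre.length : Int) + (t : Int)) - 1) 0)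
               (PySem.List.pyGetD sp ((pre.length : Int) + (t : Int)) 0 - p))) := by
      funext r t
      rw [hsp]
      have e : ((s : Int) + 1) + (t : Int) = ((pre.length : Int) + (t : Int)) := by
        rw [hpre, List.length_replicate]; push_cast; ring
      rw [e]
    rw [hrep, hfun, a_row sp p qs pre p (by rw [hpre]; simp) (by rw [hqs, hpre]; simp)
        (by rw [hpre]; simp)]
    have hrow : pre ++ scanB p p qs = rowSpec sp s := by rw [rowSpec, hpre, hp, hqs]
    rw [hrow, PySem.List.pySetD_natCast]
    apply List.ext_getElem
    · simp [hM]
    · intro k hk1 hk2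
      have hkn : k < n := by simp [hM] at hk2; omega
      rw [List.getElem_set]
      by_cases hks : s = k
      · subst hks
        rw [if_pos rfl, hMget (s + 1) s hkn, if_pos (Nat.lt_succ_self s)]
      · rw [if_neg hks, hMget s k hkn, hMget (s + 1) k hkn]
        have hiff : (k < s) ↔ (k < s + 1) := by omega
        rw [if_congr hiff rfl rfl]
  -- assemble
  have hMn : M n = (List.range n).map (rowSpec sp) := by
    rw [hM]
    apply List.map_congr_left
    intro k hk
    rw [if_pos (List.mem_range.mp hk)]
  show List.foldl _ _ _ = _
  rw [hm0, PySem.List.pyRange_one 0 (n : Int)]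
  simp only [Int.sub_zero, Int.toNat_natCast, zero_add]
  rw [List.foldl_map, ← hMn, List.range_eq_range']
  exact fold_range' n M _ hstep n 0 (by omega)

-- ===== VERDICT (by name: the statement is the Claim_ definition above) =====
theorem calc_max_profit_spec : Claim_equal_calc_max_profit := by
  intro sp _
  unfold Spec_calc_max_profit
  rw [a_eq, b_eq]
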